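-- pv_equiv track=rewrite | github.com/j2noo/SJCE_Algorithm_Study | lujae/12주차/광물캐기2.py | calCost
-- ===== SOURCE A (Python) =====
-- def calCost(canRange, minerals, pickIdx, startIdx):
--     ret = 0
--
--     costMap = []
--     costMap.append({"diamond":1, "iron":1, "stone":1})
--     costMap.append({"diamond":5, "iron":1, "stone":1})
--     costMap.append({"diamond":25, "iron":5, "stone":1})
--
--
--     for i in range(startIdx, startIdx + canRange[pickIdx]):
--         if i >= len(minerals):
--             break
--         ret += costMap[pickIdx][minerals[i]]
--
--     return ret
-- ===== SOURCE B (Python) =====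
-- def calCost(canRange, minerals, pickIdx, startIdx):
--     costs = {"diamond": [1, 5, 25], "iron": [1, 1, 5], "stone": [1, 1, 1]}
--     end = min(startIdx + canRange[pickIdx], len(minerals))
--     window = [minerals[i] for i in range(startIdx, end)]
--     return sum(costs[m][pickIdx] * window.count(m) for m in set(window))
-- ===== Notes on version B (the rewrite author's own statement) =====
-- stated objective: alternative
-- what changed: Replaces the break-guarded per-element dict-lookup accumulation with a capped window gathered once and a weighted sum of count() passes over the distinct mineral types present (set(window)), indexing a per-type cost row by pickIdx.
import Mathlib
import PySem

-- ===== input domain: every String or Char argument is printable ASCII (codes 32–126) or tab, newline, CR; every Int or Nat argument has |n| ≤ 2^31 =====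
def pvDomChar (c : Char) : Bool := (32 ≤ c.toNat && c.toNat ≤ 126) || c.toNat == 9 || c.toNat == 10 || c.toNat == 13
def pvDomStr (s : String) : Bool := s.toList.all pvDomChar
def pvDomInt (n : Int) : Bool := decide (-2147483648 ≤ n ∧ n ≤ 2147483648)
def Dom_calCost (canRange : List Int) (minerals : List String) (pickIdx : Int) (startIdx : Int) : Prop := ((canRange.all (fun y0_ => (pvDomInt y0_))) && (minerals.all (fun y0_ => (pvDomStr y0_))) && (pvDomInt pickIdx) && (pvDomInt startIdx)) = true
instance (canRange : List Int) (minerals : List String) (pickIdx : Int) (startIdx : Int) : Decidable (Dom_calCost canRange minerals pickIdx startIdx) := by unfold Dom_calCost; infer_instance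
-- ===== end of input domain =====

-- B replaces A's break-guarded per-element dict-lookup accumulation by a capped window
-- gathered once and a closed weighted sum of three count passes ('alternative', same cost).

-- ===== PORT A =====
-- 'for i in range(startIdx, startIdx + canRange[pickIdx]): if i >= len(minerals): break; ret += costMap[pickIdx][minerals[i]]'
-- fuel = length of range(startIdx, startIdx + canRange[pickIdx]); the break is the first branch, as in A.
def calCostLoopA (cm : PySem.Dict String Int) (minerals : List String) : Nat → Int → Int → Int
  | 0, _, ret => ret
  | k + 1, i, ret =>
    if (minerals.length : Int) ≤ i then ret
    else calCostLoopA cm minerals k (i + 1) (ret + cm.getD ((PySem.List.pyGet? minerals i).getD "") 0)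

-- the three dicts A appends to costMap
def costMapA : List (PySem.Dict String Int) :=
  [PySem.Dict.ofList [("diamond", 1), ("iron", 1), ("stone", 1)],
   PySem.Dict.ofList [("diamond", 5), ("iron", 1), ("stone", 1)],
   PySem.Dict.ofList [("diamond", 25), ("iron", 5), ("stone", 1)]]

def calCost (canRange : List Int) (minerals : List String) (pickIdx : Int) (startIdx : Int) : Int :=
  calCostLoopA ((PySem.List.pyGet? costMapA pickIdx).getD (PySem.Dict.ofList []))
    minerals ((startIdx + (PySem.List.pyGet? canRange pickIdx).getD 0 - startIdx).toNat) startIdx 0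

-- ===== PORT B =====
-- costs = {"diamond": [1,5,25], "iron": [1,1,5], "stone": [1,1,1]}
def costsB : PySem.Dict String (List Int) :=
  PySem.Dict.ofList [("diamond", [1, 5, 25]), ("iron", [1, 1, 5]), ("stone", [1, 1, 1])]

-- window = [minerals[i] for i in range(startIdx, min(startIdx + canRange[pickIdx], len(minerals)))]
def windowB (canRange : List Int) (minerals : List String) (pickIdx : Int) (startIdx : Int) : List String :=
  (PySem.List.pyRange startIdx
      (min (startIdx + (PySem.List.pyGet? canRange pickIdx).getD 0) (minerals.length : Int)) 1).map
    (fun i => (PySem.List.pyGet? minerals i).getD "")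

-- sum(costs[m][pickIdx] * window.count(m) for m in set(window))  (a sum, so set order cannot matter)
def calCost_alt (canRange : List Int) (minerals : List String) (pickIdx : Int) (startIdx : Int) : Int :=
  ((PySem.Set.ofList (windowB canRange minerals pickIdx startIdx)).map
      (fun m => (PySem.List.pyGet? (costsB.getD m []) pickIdx).getD 0
        * ((windowB canRange minerals pickIdx startIdx).count m : Int))).sum

-- ===== PRECONDITION & SPEC =====
-- Pre_ excludes exactly the inputs on which A raises: IndexError on canRange[pickIdx], and — when the
-- loop body runs at least once — IndexError on costMap[pickIdx] or minerals[i], or KeyError on a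
-- mineral other than diamond/iron/stone (B also raises on all of these).
def Pre_calCost (canRange : List Int) (minerals : List String) (pickIdx : Int) (startIdx : Int) : Prop :=
  (PySem.List.pyGet? canRange pickIdx).isSome = true ∧
  (startIdx < min (startIdx + (PySem.List.pyGet? canRange pickIdx).getD 0) (minerals.length : Int) →
    -3 ≤ pickIdx ∧ pickIdx < 3 ∧ -(minerals.length : Int) ≤ startIdx ∧
    ∀ i ∈ PySem.List.pyRange startIdx
        (min (startIdx + (PySem.List.pyGet? canRange pickIdx).getD 0) (minerals.length : Int)) 1,
      (PySem.List.pyGet? minerals i).isSome = true ∧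
      ((PySem.List.pyGet? minerals i).getD "" = "diamond" ∨
       (PySem.List.pyGet? minerals i).getD "" = "iron" ∨
       (PySem.List.pyGet? minerals i).getD "" = "stone"))
instance (canRange : List Int) (minerals : List String) (pickIdx : Int) (startIdx : Int) : Decidable (Pre_calCost canRange minerals pickIdx startIdx) := by unfold Pre_calCost; infer_instance

def pvWitness_calCost : List Int × List String × Int × Int := ([2], ["diamond", "stone"], 0, 0)

def Spec_calCost (canRange : List Int) (minerals : List String) (pickIdx : Int) (startIdx : Int) (out : Int) : Prop := out = calCost_alt canRange minerals pickIdx startIdx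
instance (canRange : List Int) (minerals : List String) (pickIdx : Int) (startIdx : Int) (out : Int) : Decidable (Spec_calCost canRange minerals pickIdx startIdx out) := by unfold Spec_calCost; infer_instance

-- ===== CLAIM (what is proved, stated in full; the proofs are below) =====
def Claim_equal_calCost : Prop := ∀ (canRange : List Int) (minerals : List String) (pickIdx : Int) (startIdx : Int), Dom_calCost canRange minerals pickIdx startIdx → Pre_calCost canRange minerals pickIdx startIdx → Spec_calCost canRange minerals pickIdx startIdx (calCost canRange minerals pickIdx startIdx)
-- ===== LEMMAS AND PROOFS =====

-- A's fuel loop with the break equals a foldl over the range capped at len(minerals).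
lemma calCostLoopA_eq_foldl (cm : PySem.Dict String Int) (ms : List String) :
    ∀ (k : Nat) (a ret : Int),
      calCostLoopA cm ms k a ret
        = (PySem.List.pyRange a (min (a + (k : Int)) (ms.length : Int)) 1).foldl
            (fun r i => r + cm.getD ((PySem.List.pyGet? ms i).getD "") 0) ret := by
  intro k
  induction k with
  | zero =>
    intro a ret
    rw [PySem.List.pyRange_one_eq_nil (by omega)]
    simp [calCostLoopA]
  | succ k ih =>
    intro a ret
    by_cases h : (ms.length : Int) ≤ a
    · rw [PySem.List.pyRange_one_eq_nil (by omega)]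
      simp [calCostLoopA, h]
    · rw [PySem.List.pyRange_one_cons (by push_cast; omega)]
      simp only [calCostLoopA, if_neg h, List.foldl_cons]
      rw [ih (a + 1)]
      congr 2
      push_cast
      omega

-- a per-element sum is a weighted sum of counts over the distinct elements (B's set(window) pass)
lemma map_sum_eq_set_counts (g h : String → Int) (l : List String)
    (hgh : ∀ m ∈ l, h m = g m) :
    (l.map g).sum = ((PySem.Set.ofList l).map (fun m => h m * (l.count m : Int))).sum := by
  rw [Finset.sum_list_map_count l g,
      Finset.sum_list_map_count (PySem.Set.ofList l) (fun m => h m * (l.count m : Int))]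
  have hfs : (PySem.Set.ofList l).toFinset = l.toFinset := by
    ext m; simp [List.mem_toFinset, PySem.Set.mem_ofList]
  rw [hfs]
  refine Finset.sum_congr rfl (fun m hm => ?_)
  have hml : m ∈ l := List.mem_toFinset.mp hm
  have h1 : (PySem.Set.ofList l).count m = 1 :=
    List.count_eq_one_of_mem (PySem.Set.nodup_ofList l) (by simp [PySem.Set.mem_ofList, hml])
  rw [h1, one_smul, hgh m hml, nsmul_eq_mul]
  ring

-- one costMap row: A's loop equals B's weighted set-count sum
lemma main_case (minerals : List String) (startIdx n : Int)
    (cm : PySem.Dict String Int) (h : String → Int)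
    (hd : h "diamond" = cm.getD "diamond" 0) (hi : h "iron" = cm.getD "iron" 0)
    (hs : h "stone" = cm.getD "stone" 0)
    (hall : ∀ i ∈ PySem.List.pyRange startIdx (min (startIdx + n) (minerals.length : Int)) 1,
      (PySem.List.pyGet? minerals i).isSome = true ∧
      ((PySem.List.pyGet? minerals i).getD "" = "diamond" ∨
       (PySem.List.pyGet? minerals i).getD "" = "iron" ∨
       (PySem.List.pyGet? minerals i).getD "" = "stone")) :
    calCostLoopA cm minerals ((startIdx + n - startIdx).toNat) startIdx 0
      = (((PySem.Set.ofList ((PySem.List.pyRange startIdx (min (startIdx + n) (minerals.length : Int)) 1).map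
            (fun i => (PySem.List.pyGet? minerals i).getD ""))).map
          (fun m => h m *
            (((PySem.List.pyRange startIdx (min (startIdx + n) (minerals.length : Int)) 1).map
                (fun i => (PySem.List.pyGet? minerals i).getD "")).count m : Int))).sum) := by
  rw [calCostLoopA_eq_foldl]
  by_cases hn0 : 0 ≤ n
  · have h1 : startIdx + ((startIdx + n - startIdx).toNat : Int) = startIdx + n := by omega
    rw [h1, PySem.List.foldl_add (g := fun i => cm.getD ((PySem.List.pyGet? minerals i).getD "") 0)]
    rw [show (fun i => cm.getD ((PySem.List.pyGet? minerals i).getD "") 0)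
          = (fun m => cm.getD m 0) ∘ (fun i => (PySem.List.pyGet? minerals i).getD "") from rfl,
        ← List.map_map]
    rw [map_sum_eq_set_counts (fun m => cm.getD m 0) h _
        (fun m hm => by
          obtain ⟨i, hi', rfl⟩ := List.mem_map.mp hm
          rcases (hall i hi').2 with hx | hx | hx <;> rw [hx] <;> [exact hd; exact hi; exact hs])]
    ring
  · have h1 : startIdx + ((startIdx + n - startIdx).toNat : Int) = startIdx := by omega
    rw [h1]
    rw [PySem.List.pyRange_one_eq_nil (le_trans (min_le_left _ _) (le_refl startIdx)),
        PySem.List.pyRange_one_eq_nil (le_trans (min_le_left _ _) (by omega : startIdx + n ≤ startIdx))]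
    simp

theorem calCost_spec : Claim_equal_calCost := by
  intro canRange minerals pickIdx startIdx _ hpre
  obtain ⟨hsome, hcond⟩ := hpre
  obtain ⟨n, hn⟩ := Option.isSome_iff_exists.mp hsome
  unfold Spec_calCost calCost calCost_alt windowB
  rw [hn] at hcond ⊢
  simp only [Option.getD_some] at hcond ⊢
  by_cases hne : startIdx < min (startIdx + n) (minerals.length : Int)
  · obtain ⟨hlo, hhi, _, hall⟩ := hcond hne
    interval_cases pickIdx <;>
      exact main_case minerals startIdx n _ _ (by decide) (by decide) (by decide) hall
  · rw [calCostLoopA_eq_foldl]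
    rw [PySem.List.pyRange_one_eq_nil (by omega), PySem.List.pyRange_one_eq_nil (by omega)]
    simp
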